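-- pv_equiv track=rewrite | github.com/oicr-gsi/provenanceReporter | whole_genome.py | group_limskeys
-- ===== SOURCE A (Python) =====
-- def group_limskeys(block_limskeys):
--     '''
--     (list) -> list
--
--     Sort the limskeys of an analysis block by sample
--
--     Parameters
--     ----------
--     - block_limskeys (list): List of limskeys for a given block
--
--     Examples
--     --------
--     >>> group_limskeys(['4991_1_LDI51430', '5073_4_LDI57812', '5073_3_LDI57812', '5073_2_LDI57812'])
--     ['4991_1_LDI51430', '5073_4_LDI57812;5073_3_LDI57812;5073_2_LDI57812']
--     '''
--
--     D = {}
--     for i in block_limskeys: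
--         j = i.split('_')[-1]
--         if j in D:
--             D[j].append(i)
--         else:
--             D[j] = [i]
--         D[j].sort()
--
--     L = [';'.join(D[j]) for j in D]
--
--     return L
-- ===== SOURCE B (Python) =====
-- def group_limskeys(block_limskeys):
--     # Two-phase: ordered list of distinct suffixes, then filter+sort+join per suffix.
--     suffixes = []
--     for i in block_limskeys:
--         j = i.split('_')[-1]
--         if j not in suffixes:
--             suffixes.append(j)
--     return [';'.join(sorted(i for i in block_limskeys if i.split('_')[-1] == j))
--             for j in suffixes]
-- ===== Notes on version B (the rewrite author's own statement) =====
-- stated objective: alternative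
-- what changed: Replaces A's single dict-grouping pass (which re-sorts the group after every insertion) with two phases: build the list of distinct suffixes in first-appearance order, then for each suffix filter the whole input, sort that group once and join it.
import Mathlib
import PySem

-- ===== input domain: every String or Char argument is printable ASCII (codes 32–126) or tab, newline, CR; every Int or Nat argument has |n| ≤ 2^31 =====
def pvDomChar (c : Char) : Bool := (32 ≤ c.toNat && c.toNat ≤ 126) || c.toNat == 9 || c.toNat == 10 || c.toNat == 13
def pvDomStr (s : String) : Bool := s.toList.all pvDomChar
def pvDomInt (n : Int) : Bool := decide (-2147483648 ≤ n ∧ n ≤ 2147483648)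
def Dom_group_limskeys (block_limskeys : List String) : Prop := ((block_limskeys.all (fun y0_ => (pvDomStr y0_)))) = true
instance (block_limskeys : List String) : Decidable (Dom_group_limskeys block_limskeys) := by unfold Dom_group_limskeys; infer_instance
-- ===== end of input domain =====

-- B replaces A's dict-grouping pass (re-sorting the group after every insertion) by an
-- ordered dedup of suffixes followed by one filter+sort per suffix (alternative decomposition).


-- ===== PORT A =====
-- i.split('_')[-1]  (split never yields an empty list, so the default is never used)
def pvSuffix (i : String) : String :=
  (PySem.List.pyGet? ((PySem.Str.split? i "_").getD []) (-1)).getD ""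

-- the body of A's for-loop: append (or start) the group, then sort it in place
def pvStepA (d : PySem.Dict String (List String)) (i : String) : PySem.Dict String (List String) :=
  let j := pvSuffix i
  let d1 := match d.get? j with
    | some l => d.insert j (l ++ [i])
    | none   => d.insert j [i]
  d1.insert j (PySem.List.sorted (d1.getD j []) (fun x => x) false)

def group_limskeys (block_limskeys : List String) : List String :=
  let D := block_limskeys.foldl pvStepA PySem.Dict.empty
  D.keys.map (fun j => PySem.Str.join ";" (D.getD j []))

-- ===== PORT B =====
def group_limskeys_alt (block_limskeys : List String) : List String :=
  let suffixes := PySem.List.dedup (block_limskeys.map pvSuffix)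
  suffixes.map (fun j =>
    PySem.Str.join ";"
      (PySem.List.sorted (block_limskeys.filter (fun i => pvSuffix i == j)) (fun x => x) false))

-- ===== PRECONDITION & SPEC =====
def Spec_group_limskeys (block_limskeys : List String) (out : List String) : Prop := out = group_limskeys_alt block_limskeys
instance (block_limskeys : List String) (out : List String) : Decidable (Spec_group_limskeys block_limskeys out) := by unfold Spec_group_limskeys; infer_instance

-- ===== CLAIM (what is proved, stated in full; the proofs are below) =====
def Claim_equal_group_limskeys : Prop := ∀ (block_limskeys : List String), Dom_group_limskeys block_limskeys → Spec_group_limskeys block_limskeys (group_limskeys block_limskeys)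

-- ===== LEMMAS AND PROOFS =====

-- A's loop body, simplified: the two inserts at the same key collapse
theorem pvStepA_eq (d : PySem.Dict String (List String)) (i : String) :
    pvStepA d i = d.insert (pvSuffix i)
      (PySem.List.sorted (d.getD (pvSuffix i) [] ++ [i]) (fun x => x) false) := by
  unfold pvStepA
  cases h : d.get? (pvSuffix i) with
  | some l =>
      simp [h, PySem.Dict.getD_insert_self, PySem.Dict.insert_insert_self,
            PySem.Dict.getD_of_get?_eq_some d ([] : List String) h]
  | none =>
      simp [h, PySem.Dict.insert_insert_self, PySem.Dict.getD_eq_get?_getD]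

-- lookup of key j after the whole loop, as a simple fold over the input
theorem pvGetD_loop (bs : List String) (d : PySem.Dict String (List String)) (j : String) :
    (bs.foldl pvStepA d).getD j [] =
      bs.foldl (fun acc i => if pvSuffix i = j
          then PySem.List.sorted (acc ++ [i]) (fun x => x) false else acc) (d.getD j []) := by
  induction bs generalizing d with
  | nil => rfl
  | cons i bs ih =>
      simp only [List.foldl_cons]
      rw [ih, pvStepA_eq, PySem.Dict.getD_insert]
      by_cases h : pvSuffix i = j
      · simp [h]
      · have hne : ¬ j = pvSuffix i := fun hh => h hh.symm
        rw [if_neg hne, if_neg h]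

-- sorting after every append is sorting once at the end
theorem pvSortAccum (j : String) (bs : List String) (l : List String) :
    bs.foldl (fun acc i => if pvSuffix i = j
        then PySem.List.sorted (acc ++ [i]) (fun x => x) false else acc)
      (PySem.List.sorted l (fun x => x) false) =
    PySem.List.sorted (l ++ bs.filter (fun i => pvSuffix i == j)) (fun x => x) false := by
  induction bs generalizing l with
  | nil => simp
  | cons i bs ih =>
      simp only [List.foldl_cons, List.filter_cons]
      by_cases h : pvSuffix i = j
      · have hperm : (PySem.List.sorted l (fun x => x) false ++ [i]).Perm (l ++ [i]) :=
          (PySem.List.sorted_perm l (fun x => x) false).append_right [i]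
        rw [if_pos h,
            PySem.List.sorted_eq_sorted_of_perm _ _ _ (fun a b hab => hab) hperm, ih]
        simp [h, List.append_assoc]
      · rw [if_neg h, ih]
        simp [h]

-- keys of the folded dict = distinct suffixes in first-appearance order
theorem pvKeys_loop (bs : List String) :
    (bs.foldl pvStepA PySem.Dict.empty).keys = PySem.List.dedup (bs.map pvSuffix) := by
  have hstep : pvStepA = fun d i => d.insert (pvSuffix i)
      (PySem.List.sorted (d.getD (pvSuffix i) [] ++ [i]) (fun x => x) false) := by
    funext d i; exact pvStepA_eq d i
  rw [hstep, PySem.Dict.keys_foldl_insert_key]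
  rw [PySem.Dict.keys_empty, PySem.List.dedup_eq_ofList]
  rfl

-- ===== VERDICT (by name: the statement is the Claim_ definition above) =====
theorem group_limskeys_spec : Claim_equal_group_limskeys := by
  intro bs _
  unfold Spec_group_limskeys
  simp only [group_limskeys, group_limskeys_alt]
  rw [pvKeys_loop]
  apply List.map_congr_left
  intro j _
  congr 1
  have h := pvGetD_loop bs PySem.Dict.empty j
  have h0 : (PySem.Dict.empty : PySem.Dict String (List String)).getD j [] = [] := by
    simp [PySem.Dict.getD_empty]
  rw [h0] at h
  rw [h]
  have h2 := pvSortAccum j bs []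
  simp only [List.nil_append] at h2
  exact h2
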